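-- pv_equiv track=rewrite | github.com/Zignov/FRI | FirstYear/FirstSemester/Python/DomaceNaloge/Ocena2/testi.py | strni
-- ===== SOURCE A (Python) =====
-- def strni(dnevnik):
--     rezultat = {}
--
--     for zapis in dnevnik:
--         cas, stevilka, akcija, kdo, rezultat_zapisa = zapis
--         if stevilka not in rezultat:
--             rezultat[stevilka] = []
--
--         rezultat[stevilka].append((cas, akcija, kdo, rezultat_zapisa))
--
--     max_pobuda = max(rezultat.keys(), default=0)
--     rezultat_list = [None] * (max_pobuda + 1)
--
--     for stevilka, akcije in rezultat.items():
--         rezultat_list[stevilka] = akcije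
--
--     return rezultat_list
-- ===== SOURCE B (Python) =====
-- def strni(dnevnik):
--     # Declarative two-phase approach: find the set of numbers first, then build
--     # each output slot by scanning dnevnik for its records (no dict of lists,
--     # no mutation).
--     stevilke = {zapis[1] for zapis in dnevnik}
--     n = max(stevilke, default=0)
--     return [[(cas, akcija, kdo, rez) for cas, st, akcija, kdo, rez in dnevnik if st == i]
--             if i in stevilke else None
--             for i in range(n + 1)]
-- ===== Notes on version B (the rewrite author's own statement) =====
-- stated objective: alternative
-- what changed: B replaces A's dict-of-lists grouping plus scatter-into-list with a declarative two-phase computation: it first collects the set of numbers and their maximum, then builds each output slot 0..max independently by a comprehension scanning dnevnik for that slot's records (None for absent numbers); no dict and no mutation.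
import Mathlib
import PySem

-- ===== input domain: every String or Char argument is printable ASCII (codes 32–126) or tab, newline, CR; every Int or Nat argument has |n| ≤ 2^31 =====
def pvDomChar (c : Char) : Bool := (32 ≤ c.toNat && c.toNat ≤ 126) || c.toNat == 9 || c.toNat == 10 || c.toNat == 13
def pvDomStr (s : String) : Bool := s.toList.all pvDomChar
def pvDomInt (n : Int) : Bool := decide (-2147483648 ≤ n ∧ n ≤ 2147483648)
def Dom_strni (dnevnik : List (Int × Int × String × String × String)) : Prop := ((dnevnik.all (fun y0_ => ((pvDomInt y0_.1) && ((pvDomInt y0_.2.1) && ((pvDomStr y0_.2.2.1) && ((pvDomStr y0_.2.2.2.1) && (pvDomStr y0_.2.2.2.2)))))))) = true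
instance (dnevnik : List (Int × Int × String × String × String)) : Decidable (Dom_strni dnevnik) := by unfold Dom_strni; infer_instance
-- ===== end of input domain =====

-- B computes the set of numbers and their maximum first, then builds each output slot
-- independently by scanning dnevnik for that slot's records (no dict, no mutation);
-- equivalence is about the return value (neither port mutates its argument).

-- ===== PORT A =====
-- 'rezultat_list[stevilka] = akcije' is ported with PySem.List.pySetD, exact for
-- 0 ≤ stevilka < len — guaranteed under Pre_strni (A raises or wraps on negative numbers).
def strni (dnevnik : List (Int × Int × String × String × String)) :
    List (Option (List (Int × String × String × String))) :=
  let rezultat : PySem.Dict Int (List (Int × String × String × String)) :=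
    dnevnik.foldl (fun d z =>
      let d := if d.contains z.2.1 then d else d.insert z.2.1 []
      d.modify z.2.1 [] (fun l => l ++ [(z.1, z.2.2.1, z.2.2.2.1, z.2.2.2.2)]))
      PySem.Dict.empty
  let maxPobuda : Int := (PySem.List.max? rezultat.keys (fun y => y)).getD 0
  let rezultatList : List (Option (List (Int × String × String × String))) :=
    PySem.List.pyRepeat [none] (maxPobuda + 1)
  rezultat.items.foldl (fun acc p => PySem.List.pySetD acc p.1 (some p.2)) rezultatList

-- ===== PORT B =====
-- 'max(stevilke, default=0)' consumes the set only through max with no key, which does not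
-- depend on the (unmodelled) hash iteration order; the slot comprehension is a filter+map.
def strni_alt (dnevnik : List (Int × Int × String × String × String)) :
    List (Option (List (Int × String × String × String))) :=
  let stevilke : PySem.Set Int := PySem.Set.ofList (dnevnik.map (fun z => z.2.1))
  let n : Int := (PySem.List.max? stevilke (fun y => y)).getD 0
  (PySem.List.pyRange 0 (n + 1) 1).map (fun i =>
    if stevilke.contains i then
      some ((dnevnik.filter (fun z => z.2.1 == i)).map
        (fun z => (z.1, z.2.2.1, z.2.2.2.1, z.2.2.2.2)))
    else none)

-- ===== PRECONDITION & SPEC =====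
-- Pre_ excludes records with a negative number: there A usually raises IndexError and
-- otherwise silently overwrites another slot via Python's negative-index wraparound.
def Pre_strni (dnevnik : List (Int × Int × String × String × String)) : Prop :=
  ∀ z ∈ dnevnik, 0 ≤ z.2.1
instance (dnevnik : List (Int × Int × String × String × String)) : Decidable (Pre_strni dnevnik) := by unfold Pre_strni; infer_instance

def pvWitness_strni : (List (Int × Int × String × String × String)) :=
  [(1, 0, "a", "b", "ok"), (2, 2, "c", "d", "ne"), (3, 0, "e", "f", "ok")]

def Spec_strni (dnevnik : List (Int × Int × String × String × String)) (out : List (Option (List (Int × String × String × String)))) : Prop := out = strni_alt dnevnik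
instance (dnevnik : List (Int × Int × String × String × String)) (out : List (Option (List (Int × String × String × String)))) : Decidable (Spec_strni dnevnik out) := by unfold Spec_strni; infer_instance

-- ===== CLAIM (what is proved, stated in full; the proofs are below) =====
def Claim_equal_strni : Prop := ∀ (dnevnik : List (Int × Int × String × String × String)), Dom_strni dnevnik → Pre_strni dnevnik → Spec_strni dnevnik (strni dnevnik)

-- ===== LEMMAS AND PROOFS =====

-- record payload of one log entry
def pvRec (z : Int × Int × String × String × String) : Int × String × String × String :=
  (z.1, z.2.2.1, z.2.2.2.1, z.2.2.2.2)

-- A's grouping dict, with the setdefault step already fused into a single modify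
def pvDict (dn : List (Int × Int × String × String × String)) :
    PySem.Dict Int (List (Int × String × String × String)) :=
  dn.foldl (fun d z => d.modify z.2.1 [] (fun l => l ++ [pvRec z])) PySem.Dict.empty

-- length of A's result list
def pvN (d : PySem.Dict Int (List (Int × String × String × String))) : Nat :=
  ((PySem.List.max? d.keys (fun y => y)).getD 0 + 1).toNat

-- A's second phase: materialize the dict into the indexed list
def pvMat (d : PySem.Dict Int (List (Int × String × String × String))) :
    List (Option (List (Int × String × String × String))) :=
  d.items.foldl (fun acc p => PySem.List.pySetD acc p.1 (some p.2))
    (PySem.List.pyRepeat [none] ((PySem.List.max? d.keys (fun y => y)).getD 0 + 1))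

lemma stepA_eq (d : PySem.Dict Int (List (Int × String × String × String)))
    (z : Int × Int × String × String × String) :
    (let d' := if d.contains z.2.1 then d else d.insert z.2.1 []
     d'.modify z.2.1 [] (fun l => l ++ [(z.1, z.2.2.1, z.2.2.2.1, z.2.2.2.2)]))
      = d.modify z.2.1 [] (fun l => l ++ [pvRec z]) := by
  show (if d.contains z.2.1 then d else d.insert z.2.1 []).modify z.2.1 []
      (fun l => l ++ [pvRec z]) = _
  by_cases h : d.contains z.2.1
  · rw [if_pos h]
  · rw [if_neg h]
    show (d.insert z.2.1 []).insert z.2.1 _ = d.insert z.2.1 _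
    rw [PySem.Dict.getD_insert_self, PySem.Dict.insert_insert_self,
      PySem.Dict.getD_of_not_contains d [] (by simpa using h)]

lemma strni_eq_mat (dn : List (Int × Int × String × String × String)) :
    strni dn = pvMat (pvDict dn) := by
  have hstep : (fun (d : PySem.Dict Int (List (Int × String × String × String))) z =>
      (let d' := if d.contains z.2.1 then d else d.insert z.2.1 []
       d'.modify z.2.1 [] (fun l => l ++ [(z.1, z.2.2.1, z.2.2.2.1, z.2.2.2.2)])))
      = fun d z => d.modify z.2.1 [] (fun l => l ++ [pvRec z]) := by
    funext d z; exact stepA_eq d z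
  simp only [strni, pvMat, pvDict, hstep]

lemma pvDict_append (dn : List (Int × Int × String × String × String))
    (z : Int × Int × String × String × String) :
    pvDict (dn ++ [z]) = (pvDict dn).modify z.2.1 [] (fun l => l ++ [pvRec z]) := by
  simp only [pvDict, List.foldl_append, List.foldl_cons, List.foldl_nil]

lemma find?_of_nodup {V : Type} (l : List (Int × V)) (hnd : (l.map Prod.fst).Nodup)
    (x : Int) (v : V) (hm : (x, v) ∈ l) :
    l.find? (fun p => p.1 == x) = some (x, v) := by
  induction l with
  | nil => cases hm
  | cons p t ih =>
    simp only [List.map_cons, List.nodup_cons] at hnd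
    by_cases hpx : p.1 = x
    · rcases List.mem_cons.mp hm with hh | hh
      · simp [← hh]
      · exact absurd (hpx ▸ List.mem_map_of_mem (f := Prod.fst) hh : p.1 ∈ t.map Prod.fst) hnd.1
    · rw [List.find?_cons_of_neg (h := by simpa using hpx)]
      refine ih hnd.2 ?_
      rcases List.mem_cons.mp hm with hh | hh
      · exact absurd (congrArg Prod.fst hh.symm) hpx
      · exact hh

lemma length_foldl_pySetD {V : Type} (l : List (Int × V)) (init : List (Option V)) :
    (l.foldl (fun acc p => PySem.List.pySetD acc p.1 (some p.2)) init).length = init.length := by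
  induction l generalizing init with
  | nil => rfl
  | cons p t ih => simp [List.foldl_cons, ih, PySem.List.length_pySetD]

lemma foldl_pySetD_getElem? {V : Type} (l : List (Int × V)) (init : List (Option V))
    (hk : ∀ p ∈ l, 0 ≤ p.1 ∧ p.1 < (init.length : Int)) (hnd : (l.map Prod.fst).Nodup) (j : Nat) :
    (l.foldl (fun acc p => PySem.List.pySetD acc p.1 (some p.2)) init)[j]? =
      match l.find? (fun p => p.1 == (j : Int)) with
      | some p => some (some p.2)
      | none => init[j]? := by
  induction l generalizing init with
  | nil => rfl
  | cons p t ih =>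
    obtain ⟨hp0, hplt⟩ := hk p (List.mem_cons_self ..)
    simp only [List.map_cons, List.nodup_cons] at hnd
    rw [List.foldl_cons, PySem.List.pySetD_of_nonneg _ _ hp0]
    by_cases hpj : p.1 = (j : Int)
    · rw [List.find?_cons_of_pos (h := by simpa using hpj)]
      rw [ih _ (fun q hq => by simpa [List.length_set] using hk q (List.mem_cons_of_mem _ hq)) hnd.2]
      have hfind : t.find? (fun q => q.1 == (j : Int)) = none := by
        rw [List.find?_eq_none]
        intro q hq
        simp only [beq_iff_eq]
        intro hqj
        have hmem : q.1 ∈ t.map Prod.fst := List.mem_map_of_mem hq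
        rw [hqj, ← hpj] at hmem
        exact hnd.1 hmem
      rw [hfind]
      have hjn : p.1.toNat = j := by omega
      have hlt : j < init.length := by omega
      simp [hjn, hlt]
    · rw [List.find?_cons_of_neg (h := by simpa using hpj)]
      rw [ih _ (fun q hq => by simpa [List.length_set] using hk q (List.mem_cons_of_mem _ hq)) hnd.2]
      cases t.find? (fun q => q.1 == (j : Int)) with
      | some q => rfl
      | none =>
        have hne : p.1.toNat ≠ j := by omega
        simp [hne]

lemma key_le_max (d : PySem.Dict Int (List (Int × String × String × String))) (k : Int)
    (hk : k ∈ d.keys) : k ≤ (PySem.List.max? d.keys (fun y => y)).getD 0 := by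
  cases hm : PySem.List.max? d.keys (fun y => y) with
  | none =>
    rw [PySem.List.max?_eq_none_iff] at hm
    rw [hm] at hk; cases hk
  | some m => simpa using PySem.List.max?_isMax hm k hk

lemma pvMat_getElem? (d : PySem.Dict Int (List (Int × String × String × String)))
    (hnd : d.keys.Nodup) (hpos : ∀ k ∈ d.keys, 0 ≤ k) (j : Nat) :
    (pvMat d)[j]? = if j < pvN d then some (d.get? (j : Int)) else none := by
  have hkeys : d.items.map Prod.fst = d.keys := by simp only [PySem.Dict.keys]
  have hrep : PySem.List.pyRepeat
      [(none : Option (List (Int × String × String × String)))]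
      ((PySem.List.max? d.keys (fun y => y)).getD 0 + 1)
      = List.replicate (pvN d) none := by
    rw [PySem.List.pyRepeat_singleton]; rfl
  have hk : ∀ p ∈ d.items, 0 ≤ p.1 ∧ p.1 <
      ((List.replicate (pvN d)
        (none : Option (List (Int × String × String × String)))).length : Int) := by
    intro p hp
    have hmem := PySem.Dict.mem_keys_of_mem_items d hp
    have h1 := hpos _ hmem
    have h2 := key_le_max d p.1 hmem
    simp only [List.length_replicate]
    constructor
    · exact h1
    · unfold pvN; omega
  by_cases hj : j < pvN d
  · rw [if_pos hj]
    unfold pvMat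
    rw [hrep, foldl_pySetD_getElem? d.items _ hk (hkeys ▸ hnd) j]
    cases hg : d.get? (j : Int) with
    | some v =>
      rw [find?_of_nodup d.items (hkeys ▸ hnd) (j : Int) v
        (PySem.Dict.mem_items_of_get?_eq_some d hg)]
    | none =>
      have hnm := (PySem.Dict.get?_eq_none_iff_not_mem_keys d (j : Int)).mp hg
      have hfind : d.items.find? (fun p => p.1 == (j : Int)) = none := by
        rw [List.find?_eq_none]
        intro p hp
        simp only [beq_iff_eq]
        intro hpj
        exact hnm (hpj ▸ PySem.Dict.mem_keys_of_mem_items d hp)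
      rw [hfind]
      simp [hj]
  · rw [if_neg hj]
    rw [List.getElem?_eq_none_iff]
    unfold pvMat
    rw [hrep, length_foldl_pySetD, List.length_replicate]
    omega

-- A's dict keys are exactly set(numbers), in first-occurrence order
lemma pvDict_keys (dn : List (Int × Int × String × String × String)) :
    (pvDict dn).keys = PySem.Set.ofList (dn.map (fun z => z.2.1)) := by
  unfold pvDict
  rw [PySem.Dict.keys_foldl_modify_key dn (fun z => z.2.1) []
    (fun _ z => fun l => l ++ [pvRec z]) PySem.Dict.empty]
  rw [PySem.Dict.keys_empty, PySem.Set.ofList_eq_foldl]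
  rfl

-- A's dict lookup is exactly B's per-slot comprehension
lemma pvDict_get? (dn : List (Int × Int × String × String × String)) (k : Int) :
    (pvDict dn).get? k =
      if k ∈ dn.map (fun z => z.2.1) then
        some ((dn.filter (fun z => z.2.1 == k)).map pvRec)
      else none := by
  induction dn using List.reverseRecOn with
  | nil => simp [pvDict, PySem.Dict.get?_empty]
  | append_singleton dn z ih =>
    rw [pvDict_append]
    have hmod : (pvDict dn).modify z.2.1 [] (fun l => l ++ [pvRec z])
        = (pvDict dn).insert z.2.1 ((pvDict dn).getD z.2.1 [] ++ [pvRec z]) := rfl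
    rw [hmod, PySem.Dict.get?_insert]
    have hfail : z.2.1 ∉ dn.map (fun z => z.2.1) →
        dn.filter (fun w => w.2.1 == z.2.1) = [] := by
      intro hnm
      rw [List.filter_eq_nil_iff]
      intro w hw
      simp only [beq_iff_eq]
      intro he
      exact hnm (he ▸ List.mem_map_of_mem hw)
    by_cases hk : k = z.2.1
    · subst hk
      rw [if_pos rfl, if_pos (by simp)]
      rw [PySem.Dict.getD_eq_get?_getD, ih, List.filter_append, List.map_append]
      by_cases hm : z.2.1 ∈ dn.map (fun z => z.2.1)
      · simp [hm]
      · simp [hm, hfail hm]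
    · have hbf : (z.2.1 == k) = false := beq_eq_false_iff_ne.mpr (Ne.symm hk)
      have hzfilt : List.filter (fun w => w.2.1 == k) [z] = [] := by
        simp [hbf]
      rw [if_neg hk, ih, List.filter_append, hzfilt, List.append_nil]
      by_cases hm : k ∈ dn.map (fun z => z.2.1)
      · rw [if_pos hm, if_pos (by simp [hm])]
      · rw [if_neg hm, if_neg (by simp [hm, hk])]

-- elementwise description of B's result
lemma strni_alt_getElem? (dn : List (Int × Int × String × String × String)) (j : Nat) :
    (strni_alt dn)[j]? =
      if (j : Int) < (PySem.List.max? (PySem.Set.ofList (dn.map (fun z => z.2.1)))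
            (fun y => y)).getD 0 + 1 then
        some (if (j : Int) ∈ dn.map (fun z => z.2.1) then
          some ((dn.filter (fun z => z.2.1 == (j : Int))).map pvRec) else none)
      else none := by
  unfold strni_alt
  simp only
  rw [List.getElem?_map, PySem.List.getElem?_pyRange_one]
  set n : Int := (PySem.List.max? (PySem.Set.ofList (dn.map (fun z => z.2.1)))
      (fun y => y)).getD 0 with hn
  by_cases hj : (j : Int) < n + 1
  · rw [if_pos (by omega : j < (n + 1 - 0).toNat), if_pos hj]
    simp only [Option.map_some, zero_add]
    congr 1
    by_cases hm : (j : Int) ∈ dn.map (fun z => z.2.1)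
    · rw [if_pos ((PySem.Set.contains_iff _ _).mpr ((PySem.Set.mem_ofList _ _).mpr hm)),
        if_pos hm]
      rfl
    · rw [if_neg (by
        intro hc
        exact hm ((PySem.Set.mem_ofList _ _).mp ((PySem.Set.contains_iff _ _).mp hc))),
        if_neg hm]
  · rw [if_neg (by omega : ¬ j < (n + 1 - 0).toNat), if_neg hj]
    rfl

-- ===== VERDICT (by name: the statement is the Claim_ definition above) =====
theorem strni_spec : Claim_equal_strni := by
  intro dn _ hpre
  unfold Spec_strni
  rw [strni_eq_mat]
  have hkeys := pvDict_keys dn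
  have hnd : (pvDict dn).keys.Nodup := by rw [hkeys]; exact PySem.Set.nodup_ofList _
  have hpos : ∀ k ∈ (pvDict dn).keys, 0 ≤ k := by
    intro k hk
    rw [hkeys] at hk
    rcases List.mem_map.mp ((PySem.Set.mem_ofList _ _).mp hk) with ⟨z, hz, he⟩
    exact he ▸ hpre z hz
  set n : Int := (PySem.List.max? (PySem.Set.ofList (dn.map (fun z => z.2.1)))
      (fun y => y)).getD 0 with hn
  have hn0 : 0 ≤ n := by
    cases hq : PySem.List.max? (PySem.Set.ofList (dn.map (fun z => z.2.1))) (fun y => y) with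
    | none => simp [hn, hq]
    | some x =>
      have hx := PySem.List.max?_mem hq
      have h0x := hpos x (by rw [hkeys]; exact hx)
      simp only [hn, hq, Option.getD_some]
      exact h0x
  have hNn : pvN (pvDict dn) = (n + 1).toNat := by unfold pvN; rw [hkeys]
  apply List.ext_getElem?
  intro j
  rw [pvMat_getElem? _ hnd hpos j, strni_alt_getElem? dn j, pvDict_get?]
  by_cases hj : (j : Int) < n + 1
  · rw [if_pos (by omega : j < pvN (pvDict dn)), if_pos hj]
  · rw [if_neg (by omega : ¬ j < pvN (pvDict dn)), if_neg hj]
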